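-- pv_equiv track=rewrite | github.com/AdamZhouSE/pythonHomework | Code/CodeRecords/2350/60734/309214.py | percolate
-- ===== SOURCE A (Python) =====
-- def percolate(lst):
--     lst = [x for x in lst if lst.count(x)>1]
--     i = 1
--     while i<len(lst):
--         if lst[i] == lst[i-1]:
--             lst.pop(i-1)
--             lst.pop(i-1)
--             i-=1
--         i+=1
--     return lst
-- ===== SOURCE B (Python) =====
-- def percolate(lst):
--     # One-pass frequency table instead of repeated lst.count, then a single
--     # forward scan that skips adjacent equal pairs instead of in-place pops.
--     counts = {}
--     for x in lst:
--         counts[x] = counts.get(x, 0) + 1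
--     kept = [x for x in lst if counts[x] > 1]
--     out = []
--     i = 0
--     n = len(kept)
--     while i < n:
--         if i + 1 < n and kept[i] == kept[i + 1]:
--             i += 2
--         else:
--             out.append(kept[i])
--             i += 1
--     return out
-- ===== Notes on version B (the rewrite author's own statement) =====
-- stated objective: faster
-- what changed: B builds a frequency dict in one pass instead of calling lst.count inside the comprehension, and removes adjacent equal pairs with a forward index scan into a fresh output list instead of A's in-place double-pop rescanning loop.
import Mathlib
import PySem

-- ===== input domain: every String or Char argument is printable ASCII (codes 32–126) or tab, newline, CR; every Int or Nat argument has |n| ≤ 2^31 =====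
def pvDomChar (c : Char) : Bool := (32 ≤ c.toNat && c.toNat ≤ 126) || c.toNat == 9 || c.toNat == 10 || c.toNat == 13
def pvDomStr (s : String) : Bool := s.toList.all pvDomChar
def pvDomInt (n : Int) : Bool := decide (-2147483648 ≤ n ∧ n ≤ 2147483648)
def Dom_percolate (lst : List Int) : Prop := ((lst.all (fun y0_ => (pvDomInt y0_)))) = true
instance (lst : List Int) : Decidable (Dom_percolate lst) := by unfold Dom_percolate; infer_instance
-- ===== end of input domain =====

-- B replaces A's quadratic count-filter and in-place pop loop by a one-pass
-- frequency dict and a forward pair-skipping scan (objective: faster).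

-- ===== PORT A =====
-- the while loop: compare lst[i] with lst[i-1]; on a match pop position i-1 twice
-- (exact as take/drop surgery since both indices are in range) and do i-=1; i+=1.
def percolateLoopA (lst : List Int) (i : Nat) : List Int :=
  if i < lst.length then
    if lst.getD i 0 = lst.getD (i - 1) 0 then
      -- lst.pop(i-1); lst.pop(i-1); i -= 1; then i += 1
      percolateLoopA ((lst.eraseIdx (i - 1)).eraseIdx (i - 1)) (i - 1 + 1)
    else
      percolateLoopA lst (i + 1)
  else lst
termination_by lst.length - i
decreasing_by
  · simp only [List.length_eraseIdx]
    split_ifs <;> omega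
  · omega

def percolate (lst : List Int) : List Int :=
  percolateLoopA (lst.filter (fun x => decide (1 < lst.count x))) 1

-- ===== PORT B =====
-- out/i loop of Source B: skip a matching adjacent pair, otherwise append kept[i]
def percolateLoopB (kept : List Int) (out : List Int) (i : Nat) : List Int :=
  if i < kept.length then
    if i + 1 < kept.length ∧ kept.getD i 0 = kept.getD (i + 1) 0 then
      percolateLoopB kept out (i + 2)
    else
      percolateLoopB kept (out ++ [kept.getD i 0]) (i + 1)
  else out
termination_by kept.length - i

def percolate_alt (lst : List Int) : List Int :=
  let counts : PySem.Dict Int Int := lst.foldl (fun d x => d.modify x 0 (· + 1)) PySem.Dict.empty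
  let kept := lst.filter (fun x => decide (1 < counts.getD x 0))
  percolateLoopB kept [] 0

-- ===== PRECONDITION & SPEC =====
def Spec_percolate (lst : List Int) (out : List Int) : Prop := out = percolate_alt lst
instance (lst : List Int) (out : List Int) : Decidable (Spec_percolate lst out) := by unfold Spec_percolate; infer_instance

-- ===== CLAIM (what is proved, stated in full; the proofs are below) =====
def Claim_equal_percolate : Prop := ∀ (lst : List Int), Dom_percolate lst → Spec_percolate lst (percolate lst)

-- ===== LEMMAS AND PROOFS =====

-- the common mathematical core: non-cascading left-to-right adjacent-pair removal
def pairDedup : List Int → List Int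
  | [] => []
  | [a] => [a]
  | a :: b :: rest => if a = b then pairDedup rest else a :: pairDedup (b :: rest)

theorem pairDedup_short (l : List Int) (h : l.length ≤ 1) : pairDedup l = l := by
  match l with
  | [] => rfl
  | [a] => rfl
  | a :: b :: rest => simp at h

theorem eraseIdx_twice (xs : List Int) (k : Nat) :
    (xs.eraseIdx k).eraseIdx k = xs.take k ++ xs.drop (k + 2) := by
  induction xs generalizing k with
  | nil => simp
  | cons x xs ih =>
    cases k with
    | zero =>
      cases xs with
      | nil => rfl
      | cons y ys => simp [List.eraseIdx]
    | succ k => simp [List.eraseIdx, ih]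

theorem loopA_eq (lst : List Int) (i : Nat) (h1 : 1 ≤ i) :
    percolateLoopA lst i = lst.take (i - 1) ++ pairDedup (lst.drop (i - 1)) := by
  fun_induction percolateLoopA lst i with
  | case1 lst i hlt heq ih =>
    have hi1 : i - 1 < lst.length := by omega
    rw [ih (by omega)]
    have hd1 : lst.drop (i - 1) = lst[i-1] :: lst.drop (i - 1 + 1) :=
      List.drop_eq_getElem_cons hi1
    have hd2 : lst.drop (i - 1 + 1) = lst[i] :: lst.drop (i + 1) := by
      have : lst.drop i = lst[i] :: lst.drop (i + 1) := List.drop_eq_getElem_cons hlt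
      rw [show i - 1 + 1 = i by omega, this]
    have hvals : lst[i-1] = lst[i] := by
      have e1 : lst.getD i 0 = lst[i] := List.getD_eq_getElem lst 0 hlt
      have e2 : lst.getD (i-1) 0 = lst[i-1] := List.getD_eq_getElem lst 0 hi1
      rw [e1, e2] at heq; omega
    have htl : (lst.take (i-1)).length = i - 1 := by
      simp [List.length_take]; omega
    rw [eraseIdx_twice, show i - 1 + 1 - 1 = i - 1 by omega,
        show i - 1 + 2 = i + 1 by omega,
        List.take_left' htl, List.drop_left' htl, hd1, hd2, hvals]
    simp [pairDedup]
  | case2 lst i hlt hne ih =>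
    have hi1 : i - 1 < lst.length := by omega
    rw [ih (by omega)]
    have hd1 : lst.drop (i - 1) = lst[i-1] :: lst.drop i := by
      have := List.drop_eq_getElem_cons hi1
      rw [show i - 1 + 1 = i by omega] at this; exact this
    have hd2 : lst.drop i = lst[i] :: lst.drop (i + 1) := List.drop_eq_getElem_cons hlt
    have hvals : lst[i-1] ≠ lst[i] := by
      have e1 : lst.getD i 0 = lst[i] := List.getD_eq_getElem lst 0 hlt
      have e2 : lst.getD (i-1) 0 = lst[i-1] := List.getD_eq_getElem lst 0 hi1
      rw [e1, e2] at hne; omega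
    have htake : lst.take (i + 1 - 1) = lst.take (i - 1) ++ [lst[i-1]] := by
      rw [show i + 1 - 1 = (i - 1) + 1 by omega]
      rw [List.take_add_one, List.getElem?_eq_getElem hi1]
      rfl
    rw [htake, show i + 1 - 1 = i by omega, hd1, hd2]
    simp only [pairDedup]
    rw [if_neg hvals]
    simp only [List.append_assoc, List.singleton_append]
  | case3 lst i hge =>
    have hlen : (lst.drop (i - 1)).length ≤ 1 := by
      simp [List.length_drop]; omega
    rw [pairDedup_short _ hlen, List.take_append_drop]

theorem loopB_eq (kept out : List Int) (i : Nat) :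
    percolateLoopB kept out i = out ++ pairDedup (kept.drop i) := by
  fun_induction percolateLoopB kept out i with
  | case1 out i hlt hp ih =>
    obtain ⟨hlt1, heq⟩ := hp
    have hd1 : kept.drop i = kept[i] :: kept.drop (i + 1) := List.drop_eq_getElem_cons hlt
    have hd2 : kept.drop (i + 1) = kept[i+1] :: kept.drop (i + 2) := List.drop_eq_getElem_cons hlt1
    have hvals : kept[i] = kept[i+1] := by
      have e1 : kept.getD i 0 = kept[i] := List.getD_eq_getElem kept 0 hlt
      have e2 : kept.getD (i+1) 0 = kept[i+1] := List.getD_eq_getElem kept 0 hlt1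
      rw [e1, e2] at heq; omega
    rw [ih, hd1, hd2, hvals]; simp [pairDedup]
  | case2 out i hlt hp ih =>
    have hd1 : kept.drop i = kept[i] :: kept.drop (i + 1) := List.drop_eq_getElem_cons hlt
    have e1 : kept.getD i 0 = kept[i] := List.getD_eq_getElem kept 0 hlt
    rw [ih, hd1]
    rcases Nat.lt_or_ge (i+1) kept.length with h1 | h1
    · have hd2 : kept.drop (i + 1) = kept[i+1] :: kept.drop (i + 2) := List.drop_eq_getElem_cons h1
      have hne : kept[i] ≠ kept[i+1] := fun hc =>
        hp ⟨h1, by rw [e1, List.getD_eq_getElem kept 0 h1, hc]⟩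
      rw [hd2]
      simp only [pairDedup]
      rw [if_neg hne, e1]
      simp only [List.append_assoc, List.singleton_append]
    · rw [List.drop_eq_nil_of_le h1, e1]
      simp [pairDedup]
  | case3 out i hge =>
    rw [List.drop_eq_nil_of_le (by omega)]
    simp [pairDedup]

theorem filters_eq (lst : List Int) :
    lst.filter (fun x => decide (1 < lst.count x)) =
    lst.filter (fun x => decide (1 <
      ((lst.foldl (fun d x => d.modify x 0 (· + 1)) (PySem.Dict.empty : PySem.Dict Int Int)).getD x 0))) := by
  apply List.filter_congr
  intro x _
  simp only [PySem.Dict.getD_foldl_modify_add_one]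
  simp

-- ===== VERDICT (by name: the statement is the Claim_ definition above) =====
theorem percolate_spec : Claim_equal_percolate := by
  intro lst _
  unfold Spec_percolate percolate percolate_alt
  rw [loopA_eq _ 1 (by omega), loopB_eq, filters_eq]
  rfl
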